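-- pv_equiv track=rewrite | github.com/MrBrantCode/unitest_baseline | mut_generate/mist_train_taco/taco_12112/solution.py | modify_balloon_sequence
-- ===== SOURCE A (Python) =====
-- def modify_balloon_sequence(st: str) -> str:
--     chars = []
--     count = 0
--     prev = None
--
--     for char in st:
--         if prev != char:
--             chars.append(char)
--             prev = char
--             count = 1
--         else:
--             count += 1
--             if count == 2:
--                 chars.append(char)
--
--     return ''.join(chars)
-- ===== SOURCE B (Python) =====
-- def modify_balloon_sequence(st: str) -> str:
--     out = []
--     i = 0
--     n = len(st)
--     while i < n:
--         j = i
--         while j < n and st[j] == st[i]: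
--             j += 1
--         out.append(st[i] * min(j - i, 2))
--         i = j
--     return ''.join(out)
-- ===== Notes on version B (the rewrite author's own statement) =====
-- stated objective: alternative
-- what changed: Replaced the prev/count state-machine loop with a two-pointer run scanner: find each maximal run of equal characters, then emit min(run_length, 2) copies of its character.
import Mathlib
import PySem

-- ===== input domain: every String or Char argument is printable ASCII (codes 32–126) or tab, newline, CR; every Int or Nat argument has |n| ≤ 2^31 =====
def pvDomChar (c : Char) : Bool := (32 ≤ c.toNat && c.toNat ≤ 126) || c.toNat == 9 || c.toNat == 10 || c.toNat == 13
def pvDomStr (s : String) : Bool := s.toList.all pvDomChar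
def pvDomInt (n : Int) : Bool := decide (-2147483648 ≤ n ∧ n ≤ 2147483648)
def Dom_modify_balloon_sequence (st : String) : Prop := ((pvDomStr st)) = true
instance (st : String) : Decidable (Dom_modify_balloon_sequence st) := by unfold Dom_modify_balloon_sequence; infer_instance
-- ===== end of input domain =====

-- B replaces A's prev/count state machine with a run scanner emitting min(run length, 2) copies per run (alternative decomposition, same cost).

-- ===== PORT A =====
-- A's loop: state (prev, count); append char on a change, and again when count hits 2.
def goA : Option Char → Nat → List Char → List Char
  | _, _, [] => []
  | prev, count, c :: rest =>
    if prev ≠ some c then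
      c :: goA (some c) 1 rest
    else
      if count + 1 = 2 then
        c :: goA prev (count + 1) rest
      else
        goA prev (count + 1) rest

def modify_balloon_sequence (st : String) : String :=
  String.ofList (goA none 0 st.toList)

-- ===== PORT B =====
-- B's scan: take the maximal run of the head character, emit min(len, 2) copies, continue after it.
def goB : List Char → List Char
  | [] => []
  | c :: rest =>
    let s := rest.takeWhile (· == c)
    let rest' := rest.dropWhile (· == c)
    List.replicate (min (s.length + 1) 2) c ++ goB rest'
termination_by l => l.length
decreasing_by
  simp only [List.length_cons]
  exact Nat.lt_succ_of_le (List.length_dropWhile_le _ _)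

def modify_balloon_sequence_alt (st : String) : String :=
  String.ofList (goB st.toList)

-- ===== PRECONDITION & SPEC =====
def Spec_modify_balloon_sequence (st : String) (out : String) : Prop := out = modify_balloon_sequence_alt st
instance (st : String) (out : String) : Decidable (Spec_modify_balloon_sequence st out) := by unfold Spec_modify_balloon_sequence; infer_instance

-- ===== CLAIM (what is proved, stated in full; the proofs are below) =====
def Claim_equal_modify_balloon_sequence : Prop := ∀ (st : String), Dom_modify_balloon_sequence st → Spec_modify_balloon_sequence st (modify_balloon_sequence st)

-- ===== LEMMAS AND PROOFS =====

-- Inside a run (all chars equal to prev, count already ≥ 2), A appends nothing.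
lemma skipA (c : Char) : ∀ (s rest : List Char), (∀ x ∈ s, x = c) → ∀ k, 2 ≤ k →
    goA (some c) k (s ++ rest) = goA (some c) (k + s.length) rest := by
  intro s
  induction s with
  | nil => intro rest _ k _; simp
  | cons d s' ih =>
    intro rest hall k hk
    have hd : d = c := hall d (by simp)
    subst hd
    have : ¬ (k + 1 = 2) := by omega
    simp only [List.cons_append, goA, ne_eq, not_true_eq_false, if_false, this, reduceIte]
    rw [ih rest (fun x hx => hall x (by simp [hx])) (k + 1) (by omega)]
    congr 1
    simp; omega

-- At a "fresh" boundary (prev differs from the head of the remaining input), A equals B.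
lemma freshA : ∀ (n : Nat) (l : List Char), l.length ≤ n → ∀ (prev : Option Char) (k : Nat),
    (∀ c, l.head? = some c → prev ≠ some c) → goA prev k l = goB l := by
  intro n
  induction n with
  | zero =>
    intro l hl prev k _
    have : l = [] := List.eq_nil_of_length_eq_zero (Nat.le_zero.mp hl)
    subst this; simp [goA, goB]
  | succ n ih =>
    intro l hl prev k hfresh
    match l with
    | [] => simp [goA, goB]
    | c :: rest =>
      have hne : prev ≠ some c := hfresh c rfl
      have hsplit : rest.takeWhile (· == c) ++ rest.dropWhile (· == c) = rest :=
        List.takeWhile_append_dropWhile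
      have hrest'len : (rest.dropWhile (· == c)).length ≤ rest.length :=
        List.length_dropWhile_le _ _
      have hrestlen : rest.length ≤ n := by
        simp only [List.length_cons] at hl; omega
      have hfresh' : ∀ d, (rest.dropWhile (· == c)).head? = some d →
          (some c : Option Char) ≠ some d := by
        intro d hd heq
        have hdc : c = d := by injection heq
        subst hdc
        have hpf := List.head?_dropWhile_not (· == c) rest
        rw [hd] at hpf
        simp at hpf
      rw [goB]
      simp only [goA, hne, ne_eq, not_false_eq_true, if_pos]
      rcases hse : rest.takeWhile (· == c) with _ | ⟨d, s''⟩
      · have hrr : rest.dropWhile (· == c) = rest := by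
          conv_rhs => rw [← hsplit]
          rw [hse, List.nil_append]
        have hres := ih rest hrestlen (some c) 1 (by rw [← hrr]; exact hfresh')
        simp only [hse, List.length_nil, Nat.zero_add, hrr] at *
        simp [hres]
      · have hall : ∀ x ∈ d :: s'', x = c := by
          intro x hx
          have := List.mem_takeWhile_imp (l := rest) (p := (· == c)) (by rw [hse]; exact hx)
          simpa using this
        have hdc : c = d := (hall d (by simp)).symm
        subst hdc
        have hall'' : ∀ x ∈ s'', x = c := fun x hx => hall x (by simp [hx])
        have hstep : goA (some c) 1 rest =
            c :: goA (some c) (2 + s''.length) (rest.dropWhile (· == c)) := by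
          conv_lhs => rw [← hsplit, hse]
          simp only [List.cons_append, goA, ne_eq, not_true_eq_false, if_false, reduceIte]
          rw [skipA c s'' (rest.dropWhile (· == c)) hall'' 2 (by omega)]
        rw [hstep]
        rw [ih (rest.dropWhile (· == c)) (le_trans hrest'len hrestlen)
          (some c) (2 + s''.length) hfresh']
        simp [hse]

-- ===== VERDICT (by name: the statement is the Claim_ definition above) =====
theorem modify_balloon_sequence_spec : Claim_equal_modify_balloon_sequence := by
  unfold Claim_equal_modify_balloon_sequence
  intro st _
  unfold Spec_modify_balloon_sequence modify_balloon_sequence modify_balloon_sequence_alt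
  congr 1
  exact freshA st.toList.length st.toList le_rfl none 0 (by simp)
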